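-- pv_equiv track=rewrite | github.com/Nahums0/expenses_tracker | backend/app/api/helpers.py | distribute_transactions_across_chunks
-- ===== SOURCE A (Python) =====
-- def calculate_chunk_index(index, chunk_size):
--     """
--     Calculate the chunk index for a given transaction index.
--     """
--
--     return 0 if index == 0 else int(index / chunk_size)
--
-- def initialize_empty_chunk(chunk_size):
--     """
--     Initialize an empty chunk with a specified size.
--     """
--
--     return [None for _ in range(chunk_size)]
--
-- def distribute_transactions_across_chunks(transactions, start_index, total_count, chunk_size):
--     """
--     Distribute transactions across chunks based on their index.
--     """
--
--     # Calculate total number of chunks needed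
--     total_chunks = (calculate_chunk_index(total_count - 1, chunk_size)) + 1
--     chunks = [None for _ in range(total_chunks)]
--
--     # Iterate over transactions and place each in the appropriate chunk
--     for i in range(start_index, start_index + len(transactions)):
--         current_chunk_index = calculate_chunk_index(i, chunk_size)
--
--         # Initialize chunk if it's empty
--         if chunks[current_chunk_index] is None:
--             chunks[current_chunk_index] = initialize_empty_chunk(chunk_size)
--
--         # Calculate the index of the transaction within its chunk
--         transaction_index_within_chunk = i % chunk_size
--
--         # Place the transaction in the correct chunk and position
--         chunks[current_chunk_index][transaction_index_within_chunk] = transactions[i - start_index]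
--
--     return chunks
-- ===== SOURCE B (Python) =====
-- def distribute_transactions_across_chunks(transactions, start_index, total_count, chunk_size):
--     """
--     Distribute transactions across chunks based on their index.
--     Chunk-major decomposition: each chunk owns the global-index window
--     [c*chunk_size, (c+1)*chunk_size); fill a chunk from the part of that
--     window that overlaps the transactions' index range, else leave it None.
--     """
--     total_chunks = (0 if total_count == 1 else int((total_count - 1) / chunk_size)) + 1
--     end_index = start_index + len(transactions)
--     chunks = []
--     for c in range(total_chunks):
--         lo = c * chunk_size
--         a = max(lo, start_index)
--         b = min(lo + chunk_size, end_index)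
--         if a < b:
--             chunk = [None] * chunk_size
--             for i in range(a, b):
--                 chunk[i - lo] = transactions[i - start_index]
--             chunks.append(chunk)
--         else:
--             chunks.append(None)
--     return chunks
-- ===== Notes on version B (the rewrite author's own statement) =====
-- stated objective: alternative
-- what changed: B is chunk-major instead of transaction-major: it iterates over the chunks, intersects each chunk's global-index window [c*chunk_size,(c+1)*chunk_size) with the transactions' index range and fills the chunk from that slice, instead of A's preallocate-then-scatter over the transactions; Pre_ excludes nonempty transaction lists with negative start_index, where A's placement of negative global indices is an accident of int() truncation toward zero plus Python negative-list-index wraparound.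
-- outside the precondition, e.g. on distribute_transactions_across_chunks([7], -2, 4, 2): A returns [None, [7, None]], B returns [None, None]
import Mathlib
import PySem

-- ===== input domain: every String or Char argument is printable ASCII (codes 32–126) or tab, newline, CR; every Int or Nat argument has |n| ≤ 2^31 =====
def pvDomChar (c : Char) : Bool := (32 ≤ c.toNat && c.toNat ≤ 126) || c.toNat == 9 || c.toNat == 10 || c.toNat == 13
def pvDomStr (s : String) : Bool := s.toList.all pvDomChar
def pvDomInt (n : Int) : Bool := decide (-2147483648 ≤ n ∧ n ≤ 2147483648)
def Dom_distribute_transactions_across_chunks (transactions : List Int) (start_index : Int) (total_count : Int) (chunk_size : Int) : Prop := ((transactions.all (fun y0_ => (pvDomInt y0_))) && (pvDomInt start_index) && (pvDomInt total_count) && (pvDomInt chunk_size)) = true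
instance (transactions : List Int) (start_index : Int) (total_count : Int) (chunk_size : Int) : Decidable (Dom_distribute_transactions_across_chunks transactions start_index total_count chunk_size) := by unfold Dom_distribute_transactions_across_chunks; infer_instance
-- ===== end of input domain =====

-- B distributes chunk-major (per-chunk window intersection with the transactions' index
-- range) instead of A's transaction-major scatter into a preallocated list; neither
-- version mutates its arguments.

-- ===== PORT A =====
-- int(index / chunk_size) is truncating division: PySem.Int.truncdiv (exact for |args| < 2^53, so on Dom)
def calculate_chunk_index (index : Int) (chunk_size : Int) : Int :=
  if index = 0 then 0 else PySem.Int.truncdiv index chunk_size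

def initialize_empty_chunk (chunk_size : Int) : List (Option Int) :=
  (PySem.List.pyRange 0 chunk_size 1).map (fun _ => (none : Option Int))

def distribute_transactions_across_chunks (transactions : List Int) (start_index : Int) (total_count : Int) (chunk_size : Int) : List (Option (List (Option Int))) :=
  let total_chunks := calculate_chunk_index (total_count - 1) chunk_size + 1
  let chunks : List (Option (List (Option Int))) :=
    (PySem.List.pyRange 0 total_chunks 1).map (fun _ => none)
  (PySem.List.pyRange start_index (start_index + transactions.length) 1).foldl
    (fun chunks i =>
      let current_chunk_index := calculate_chunk_index i chunk_size
      -- chunks[current_chunk_index]: IndexError = none (excluded by Pre_), then init if None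
      let chunk : List (Option Int) :=
        match (PySem.List.pyGet? chunks current_chunk_index).getD none with
        | none => initialize_empty_chunk chunk_size
        | some c => c
      let transaction_index_within_chunk := PySem.Int.mod i chunk_size
      PySem.List.pySetD chunks current_chunk_index
        (some (PySem.List.pySetD chunk transaction_index_within_chunk
          (some (PySem.List.pyGetD transactions (i - start_index) 0)))))
    chunks

-- ===== PORT B =====
def distribute_transactions_across_chunks_alt (transactions : List Int) (start_index : Int) (total_count : Int) (chunk_size : Int) : List (Option (List (Option Int))) :=
  let total_chunks : Int :=
    (if total_count = 1 then 0 else PySem.Int.truncdiv (total_count - 1) chunk_size) + 1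
  let end_index : Int := start_index + transactions.length
  (PySem.List.pyRange 0 total_chunks 1).foldl
    (fun chunks c =>
      let lo := c * chunk_size
      let a := max lo start_index
      let b := min (lo + chunk_size) end_index
      chunks ++
        [if a < b then
          some ((PySem.List.pyRange a b 1).foldl
            (fun chunk i =>
              PySem.List.pySetD chunk (i - lo)
                (some (PySem.List.pyGetD transactions (i - start_index) 0)))
            ((PySem.List.pyRange 0 chunk_size 1).map (fun _ => (none : Option Int))))
        else none])
    []

-- ===== PRECONDITION & SPEC =====
-- closed-form helper for Pre_/proofs: Python's total chunk count (via A's helper)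
def pvT (total_count chunk_size : Int) : Int :=
  calculate_chunk_index (total_count - 1) chunk_size + 1

-- Pre_ = exactly the inputs on which Python A returns: with no transactions A only needs
-- total_chunks to be computable (chunk_size ≠ 0 unless total_count = 1); with transactions
-- it needs chunk_size ≥ 1 (chunk_size ≤ 0 always raises ZeroDivisionError/IndexError inside
-- the loop) and every transaction's chunk index within Python list-index range [-T, T).
-- Pre_ excludes nonempty transaction lists with negative start_index although A returns
-- there: where a global index is negative, A's placement is an accident of int()'s
-- truncation toward zero and Python's negative-list-index wraparound (transactions land in
-- chunks counted from the end), which B's window arithmetic has no reason to reproduce.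
def Pre_distribute_transactions_across_chunks (transactions : List Int) (start_index : Int) (total_count : Int) (chunk_size : Int) : Prop :=
  if transactions.length = 0 then (chunk_size ≠ 0 ∨ total_count = 1)
  else 0 ≤ start_index ∧ 1 ≤ chunk_size ∧ ∀ k : Nat, k < transactions.length →
    calculate_chunk_index (start_index + k) chunk_size < pvT total_count chunk_size
instance (transactions : List Int) (start_index : Int) (total_count : Int) (chunk_size : Int) : Decidable (Pre_distribute_transactions_across_chunks transactions start_index total_count chunk_size) := by unfold Pre_distribute_transactions_across_chunks; infer_instance

def pvWitness_distribute_transactions_across_chunks : List Int × Int × Int × Int := ([5, 6, 7], 1, 4, 2)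

def Spec_distribute_transactions_across_chunks (transactions : List Int) (start_index : Int) (total_count : Int) (chunk_size : Int) (out : List (Option (List (Option Int)))) : Prop := out = distribute_transactions_across_chunks_alt transactions start_index total_count chunk_size
instance (transactions : List Int) (start_index : Int) (total_count : Int) (chunk_size : Int) (out : List (Option (List (Option Int)))) : Decidable (Spec_distribute_transactions_across_chunks transactions start_index total_count chunk_size out) := by unfold Spec_distribute_transactions_across_chunks; infer_instance

-- ===== CLAIM (what is proved, stated in full; the proofs are below) =====
def Claim_equal_distribute_transactions_across_chunks : Prop := ∀ (transactions : List Int) (start_index : Int) (total_count : Int) (chunk_size : Int), Dom_distribute_transactions_across_chunks transactions start_index total_count chunk_size → Pre_distribute_transactions_across_chunks transactions start_index total_count chunk_size → Spec_distribute_transactions_across_chunks transactions start_index total_count chunk_size (distribute_transactions_across_chunks transactions start_index total_count chunk_size)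

-- ===== LEMMAS AND PROOFS =====

-- the common elementwise description both programs are reduced to:
-- chunk c covers global indices [c*cs, c*cs+cs); position p holds the transaction with
-- global index c*cs+p when that index lies in [s, e); the chunk is present iff nonempty.
def pvInner (ts : List Int) (s e cs c : Int) : List (Option Int) :=
  (PySem.List.pyRange 0 cs 1).map (fun p =>
    if s ≤ c * cs + p ∧ c * cs + p < e then some (PySem.List.pyGetD ts (c * cs + p - s) 0)
    else none)

def pvSpec (ts : List Int) (s e cs T : Int) : List (Option (List (Option Int))) :=
  (PySem.List.pyRange 0 T 1).map (fun c =>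
    if max (c * cs) s < min (c * cs + cs) e then some (pvInner ts s e cs c) else none)

theorem pvCi (i cs : Int) (h : 0 ≤ i) : calculate_chunk_index i cs = i / cs := by
  unfold calculate_chunk_index PySem.Int.truncdiv
  split_ifs with h0
  · simp [h0]
  · exact Int.tdiv_eq_ediv_of_nonneg h

-- window membership determines the chunk index uniquely
theorem pvWin (c d cs i : Int) (hcs : 0 < cs) (h1 : c * cs ≤ i) (h2 : i < c * cs + cs)
    (h3 : d * cs ≤ i) (h4 : i < d * cs + cs) : c = d := by
  rcases lt_trichotomy c d with h | h | h
  · exfalso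
    have : (c + 1) * cs ≤ d * cs := mul_le_mul_of_nonneg_right (by omega) (by omega)
    nlinarith
  · exact h
  · exfalso
    have : (d + 1) * cs ≤ c * cs := mul_le_mul_of_nonneg_right (by omega) (by omega)
    nlinarith

-- filling one chunk from its window slice, as B does, yields pvInner's description
theorem pvFill (ts : List Int) (s cs lo a : Int) (hla : lo ≤ a) :
    ∀ (n : Nat), a + n ≤ lo + cs →
    (PySem.List.pyRange a (a + n) 1).foldl
      (fun chunk i =>
        PySem.List.pySetD chunk (i - lo) (some (PySem.List.pyGetD ts (i - s) 0)))
      ((PySem.List.pyRange 0 cs 1).map (fun _ => (none : Option Int)))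
    = (PySem.List.pyRange 0 cs 1).map (fun p =>
        if a ≤ lo + p ∧ lo + p < a + n then some (PySem.List.pyGetD ts (lo + p - s) 0)
        else none) := by
  intro n
  induction n with
  | zero =>
    intro _
    rw [show a + (0 : Nat) = a by omega, PySem.List.pyRange_one_eq_nil le_rfl]
    apply List.map_congr_left
    intro p hp
    rw [PySem.List.mem_pyRange_one] at hp
    rw [if_neg (by omega)]
  | succ n ih =>
    intro hn
    rw [show a + ((n : Nat) + 1 : Nat) = (a + n) + 1 by push_cast; ring,
      PySem.List.pyRange_one_succ_right (by omega), List.foldl_append, List.foldl_cons,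
      List.foldl_nil, ih (by omega)]
    rw [PySem.List.pySetD_of_nonneg _ _ (show (0:Int) ≤ a + (n:Int) - lo by omega)]
    apply List.ext_getElem
    · simp
    · intro k hk1 hk2
      simp only [List.length_map, PySem.List.length_pyRange_one] at hk2
      have hkcs : (k : Int) < cs := by omega
      rw [List.getElem_set]
      simp only [List.getElem_map, PySem.List.getElem_pyRange_one, zero_add]
      by_cases he : (a + (n : Int) - lo).toNat = k
      · rw [if_pos he]
        have hlk : lo + (k : Int) = a + (n : Int) := by omega
        rw [if_pos (show a ≤ lo + (k:Int) ∧ lo + (k:Int) < a + (n:Int) + 1 by omega), hlk]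
      · rw [if_neg he]
        have hne : lo + (k : Int) ≠ a + (n : Int) := by omega
        by_cases hc : a ≤ lo + (k:Int) ∧ lo + (k:Int) < a + (n:Int)
        · rw [if_pos hc, if_pos (show a ≤ lo + (k:Int) ∧ lo + (k:Int) < a + (n:Int) + 1 by omega)]
        · rw [if_neg hc, if_neg (show ¬(a ≤ lo + (k:Int) ∧ lo + (k:Int) < a + (n:Int) + 1) by omega)]

theorem pv_b_eq_spec (ts : List Int) (s tc cs : Int) :
    distribute_transactions_across_chunks_alt ts s tc cs = pvSpec ts s (s + ts.length) cs (pvT tc cs) := by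
  unfold distribute_transactions_across_chunks_alt pvSpec
  have hT : (if tc = 1 then 0 else PySem.Int.truncdiv (tc - 1) cs) + 1 = pvT tc cs := by
    unfold pvT calculate_chunk_index
    by_cases h1 : tc = 1
    · rw [if_pos h1, if_pos (by omega)]
    · rw [if_neg h1, if_neg (by omega)]
  rw [hT, PySem.List.foldl_append_singleton_eq_map, List.nil_append]
  apply List.map_congr_left
  intro c hc
  rw [PySem.List.mem_pyRange_one] at hc
  by_cases hab : max (c * cs) s < min (c * cs + cs) (s + ts.length)
  · rw [if_pos hab, if_pos hab]
    congr 1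
    have hn : min (c * cs + cs) (s + ts.length) =
        max (c * cs) s + ((min (c * cs + cs) (s + ts.length) - max (c * cs) s).toNat : Int) := by
      omega
    rw [hn, pvFill ts s cs (c * cs) _ (le_max_left _ _) _ (by omega)]
    unfold pvInner
    apply List.map_congr_left
    intro p hp
    rw [PySem.List.mem_pyRange_one] at hp
    have : (max (c * cs) s ≤ c * cs + p ∧ c * cs + p < max (c * cs) s +
        ((min (c * cs + cs) (s + ts.length) - max (c * cs) s).toNat : Int)) =
        (s ≤ c * cs + p ∧ c * cs + p < s + ts.length) := by
      apply propext; omega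
    simp only [this]
  · rw [if_neg hab, if_neg hab]

-- before any transaction is placed every chunk is absent
theorem pvSpec_base (ts : List Int) (s cs T : Int) :
    pvSpec ts s s cs T = (PySem.List.pyRange 0 T 1).map (fun _ => none) := by
  unfold pvSpec
  apply List.map_congr_left
  intro c hc
  rw [if_neg (by omega)]

theorem pvSpec_get (ts : List Int) (s e cs T c : Int) (h0 : 0 ≤ c) (hT : c < T) :
    PySem.List.pyGet? (pvSpec ts s e cs T) c =
      some (if max (c * cs) s < min (c * cs + cs) e then some (pvInner ts s e cs c) else none) := by
  rw [PySem.List.pyGet?_of_nonneg (xs := pvSpec ts s e cs T) h0]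
  unfold pvSpec
  rw [List.getElem?_eq_getElem (by simp only [List.length_map, PySem.List.length_pyRange_one]; omega)]
  simp only [List.getElem_map, PySem.List.getElem_pyRange_one, zero_add, Int.toNat_of_nonneg h0]

-- one iteration of A's loop, on the elementwise description
theorem pvStepA (ts : List Int) (s cs T : Int) (m : Nat) (hcs : 1 ≤ cs) (hs : 0 ≤ s)
    (hlt : calculate_chunk_index (s + m) cs < T) :
    (fun chunks i =>
      let current_chunk_index := calculate_chunk_index i cs
      let chunk : List (Option Int) :=
        match (PySem.List.pyGet? chunks current_chunk_index).getD none with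
        | none => initialize_empty_chunk cs
        | some c => c
      let transaction_index_within_chunk := PySem.Int.mod i cs
      PySem.List.pySetD chunks current_chunk_index
        (some (PySem.List.pySetD chunk transaction_index_within_chunk
          (some (PySem.List.pyGetD ts (i - s) 0)))))
      (pvSpec ts s (s + m) cs T) (s + m)
    = pvSpec ts s (s + m + 1) cs T := by
  simp only []
  set i := s + (m : Int) with hi
  have hi0 : 0 ≤ i := by omega
  rw [pvCi i cs hi0] at hlt ⊢
  set ci := i / cs with hci
  have hci0 : 0 ≤ ci := Int.ediv_nonneg hi0 (by omega)
  have hre : i % cs + cs * (i / cs) = i := Int.emod_add_mul_ediv i cs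
  rw [← hci] at hre
  have hr0 : 0 ≤ i % cs := Int.emod_nonneg i (by omega)
  have hrc : i % cs < cs := Int.emod_lt_of_pos i (by omega)
  have hslot : ci * cs + i % cs = i := by rw [mul_comm]; omega
  have hwin1 : ci * cs ≤ i := by omega
  have hwin2 : i < ci * cs + cs := by omega
  rw [PySem.Int.mod_eq_emod_of_pos (by omega), pvSpec_get ts s (s + m) cs T ci hci0 hlt]
  have hchunk : ∀ chunk0 : List (Option Int),
      chunk0 = pvInner ts s i cs ci ∨
        (chunk0 = initialize_empty_chunk cs ∧ ¬ max (ci * cs) s < min (ci * cs + cs) i) →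
      PySem.List.pySetD chunk0 (i % cs) (some (PySem.List.pyGetD ts (i - s) 0))
        = pvInner ts s (i + 1) cs ci := by
    intro chunk0 hc0
    rw [PySem.List.pySetD_of_nonneg _ _ hr0]
    have hlen : chunk0.length = cs.toNat := by
      rcases hc0 with h | ⟨h, _⟩ <;> subst h <;>
        simp [pvInner, initialize_empty_chunk, PySem.List.length_pyRange_one]
    apply List.ext_getElem
    · simp [hlen, pvInner, PySem.List.length_pyRange_one]
    · intro k hk1 hk2
      simp only [pvInner, List.length_map, PySem.List.length_pyRange_one] at hk2
      have hkcs : (k : Int) < cs := by omega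
      rw [List.getElem_set]
      simp only [pvInner, List.getElem_map, PySem.List.getElem_pyRange_one, zero_add]
      by_cases he : (i % cs).toNat = k
      · rw [if_pos he]
        have hlk : ci * cs + (k : Int) = i := by omega
        rw [if_pos (show s ≤ ci * cs + (k:Int) ∧ ci * cs + (k:Int) < i + 1 by omega), hlk]
      · rw [if_neg he]
        have hne : ci * cs + (k : Int) ≠ i := by omega
        rcases hc0 with h | ⟨h, hnw⟩ <;> subst h
        · simp only [pvInner, List.getElem_map, PySem.List.getElem_pyRange_one, zero_add]
          by_cases hc : s ≤ ci * cs + (k:Int) ∧ ci * cs + (k:Int) < i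
          · rw [if_pos hc, if_pos (show s ≤ ci * cs + (k:Int) ∧ ci * cs + (k:Int) < i + 1 by omega)]
          · rw [if_neg hc, if_neg (show ¬(s ≤ ci * cs + (k:Int) ∧ ci * cs + (k:Int) < i + 1) by omega)]
        · simp only [initialize_empty_chunk, List.getElem_map]
          rw [if_neg (show ¬(s ≤ ci * cs + (k:Int) ∧ ci * cs + (k:Int) < i + 1) by omega)]
  have houter : ∀ inner : List (Option Int), inner = pvInner ts s (i + 1) cs ci →
      PySem.List.pySetD (pvSpec ts s i cs T) ci (some inner) = pvSpec ts s (i + 1) cs T := by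
    intro inner hin
    subst hin
    rw [PySem.List.pySetD_of_nonneg _ _ hci0]
    apply List.ext_getElem
    · simp [pvSpec, PySem.List.length_pyRange_one]
    · intro k hk1 hk2
      simp only [pvSpec, List.length_map, PySem.List.length_pyRange_one] at hk2
      rw [List.getElem_set]
      simp only [pvSpec, List.getElem_map, PySem.List.getElem_pyRange_one, zero_add]
      by_cases he : ci.toNat = k
      · have hkci : (k : Int) = ci := by omega
        rw [if_pos he, hkci,
          if_pos (show max (ci * cs) s < min (ci * cs + cs) (i + 1) by omega)]
      · rw [if_neg he]
        have hkci : (k : Int) ≠ ci := by omega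
        have hnw : ¬((k : Int) * cs ≤ i ∧ i < (k : Int) * cs + cs) := by
          intro ⟨hw1, hw2⟩
          exact hkci (pvWin (k : Int) ci cs i (by omega) hw1 hw2 hwin1 hwin2)
        by_cases hco : max ((k:Int) * cs) s < min ((k:Int) * cs + cs) i
        · rw [if_pos hco,
            if_pos (show max ((k:Int) * cs) s < min ((k:Int) * cs + cs) (i + 1) by omega)]
          congr 1
          unfold pvInner
          apply List.map_congr_left
          intro p hp
          rw [PySem.List.mem_pyRange_one] at hp
          have hne : (k:Int) * cs + p ≠ i := by
            intro hEq; exact hnw ⟨by omega, by omega⟩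
          by_cases hc : s ≤ (k:Int) * cs + p ∧ (k:Int) * cs + p < i
          · rw [if_pos hc, if_pos (show s ≤ (k:Int) * cs + p ∧ (k:Int) * cs + p < i + 1 by omega)]
          · rw [if_neg hc, if_neg (show ¬(s ≤ (k:Int) * cs + p ∧ (k:Int) * cs + p < i + 1) by omega)]
        · rw [if_neg hco,
            if_neg (show ¬ max ((k:Int) * cs) s < min ((k:Int) * cs + cs) (i + 1) by omega)]
  by_cases hw : max (ci * cs) s < min (ci * cs + cs) (s + (m : Int))
  · rw [if_pos hw]
    simp only [Option.getD_some]
    rw [← hi]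
    rw [hchunk _ (Or.inl rfl), houter _ rfl]
  · rw [if_neg hw]
    simp only [Option.getD_some]
    rw [hchunk _ (Or.inr ⟨rfl, by rw [← hi] at hw; exact hw⟩), houter _ rfl]

theorem pvLoopA (ts : List Int) (s cs T : Int) (hcs : 1 ≤ cs) (hs : 0 ≤ s)
    (hlt : ∀ k : Nat, k < ts.length → calculate_chunk_index (s + k) cs < T) :
    ∀ m : Nat, m ≤ ts.length →
    (List.range m).foldl
      (fun chunks (k : Nat) =>
        (fun chunks i =>
          let current_chunk_index := calculate_chunk_index i cs
          let chunk : List (Option Int) :=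
            match (PySem.List.pyGet? chunks current_chunk_index).getD none with
            | none => initialize_empty_chunk cs
            | some c => c
          let transaction_index_within_chunk := PySem.Int.mod i cs
          PySem.List.pySetD chunks current_chunk_index
            (some (PySem.List.pySetD chunk transaction_index_within_chunk
              (some (PySem.List.pyGetD ts (i - s) 0)))))
          chunks (s + (k : Int)))
      ((PySem.List.pyRange 0 T 1).map (fun _ => none))
    = pvSpec ts s (s + m) cs T := by
  intro m
  induction m with
  | zero =>
    intro _
    simp only [List.range_zero, List.foldl_nil, Nat.cast_zero, add_zero]
    exact (pvSpec_base ts s cs T).symm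
  | succ m ih =>
    intro hm
    rw [List.range_succ, List.foldl_append, List.foldl_cons, List.foldl_nil,
      ih (by omega)]
    have h2 : s + ((m + 1 : Nat) : Int) = s + (m : Int) + 1 := by push_cast; ring
    rw [h2]
    exact pvStepA ts s cs T m hcs hs (hlt m (by omega))

theorem pv_a_eq_spec (ts : List Int) (s tc cs : Int)
    (h : ts = [] ∨ (1 ≤ cs ∧ 0 ≤ s ∧ ∀ k : Nat, k < ts.length →
      calculate_chunk_index (s + k) cs < pvT tc cs)) :
    distribute_transactions_across_chunks ts s tc cs = pvSpec ts s (s + ts.length) cs (pvT tc cs) := by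
  unfold distribute_transactions_across_chunks
  rcases h with h | ⟨hcs, hs, hlt⟩
  · subst h
    simp only [List.length_nil, Nat.cast_zero, add_zero,
      PySem.List.pyRange_one_eq_nil (le_refl s), List.foldl_nil]
    exact (pvSpec_base _ s cs _).symm
  · have he : PySem.List.pyRange s (s + ts.length) 1
        = (List.range ts.length).map (fun k : Nat => s + (k : Int)) := by
      rw [PySem.List.pyRange_one,
        show ((s + (ts.length : Int)) - s).toNat = ts.length by omega]
    rw [he, List.foldl_map]
    exact pvLoopA ts s cs (pvT tc cs) hcs hs hlt ts.length le_rfl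

-- ===== VERDICT (by name: the statements are the Claim_ definitions above) =====
theorem distribute_transactions_across_chunks_spec : Claim_equal_distribute_transactions_across_chunks := by
  intro ts s tc cs _ hpre
  unfold Spec_distribute_transactions_across_chunks
  rw [pv_b_eq_spec]
  apply pv_a_eq_spec
  by_cases hts : ts = []
  · exact Or.inl hts
  · right
    unfold Pre_distribute_transactions_across_chunks at hpre
    rw [if_neg (by simpa [List.length_eq_zero_iff] using hts)] at hpre
    exact ⟨hpre.2.1, hpre.1, hpre.2.2⟩
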